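-- pv_equiv track=rewrite | github.com/GrantMatejka/AdventOfCode | 2023/13/sol.py | get_all_refl_rows
-- ===== SOURCE A (Python) =====
-- def get_all_refl_rows(terrain):
-- 	x = 0
-- 	res = []
-- 	while x < len(terrain):
-- 		lower = x
-- 		upper = x + 1
-- 		mirrored = False
-- 		while lower >= 0 and upper < len(terrain):
-- 			if terrain[lower] != terrain[upper]:
-- 				mirrored = False
-- 				break
-- 			else:
-- 				mirrored = True
-- 			lower -= 1
-- 			upper += 1
--
-- 		if mirrored:
-- 			res.append(x)
-- 		x += 1
-- 	return res
-- ===== SOURCE B (Python) =====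
-- def get_all_refl_rows(terrain):
-- 	n = len(terrain)
-- 	res = []
-- 	for x in range(n - 1):
-- 		m = min(x + 1, n - 1 - x)
-- 		if terrain[x + 1 - m : x + 1] == terrain[x + 1 : x + 1 + m][::-1]:
-- 			res.append(x)
-- 	return res
-- ===== Notes on version B (the rewrite author's own statement) =====
-- stated objective: simpler
-- what changed: The inner two-pointer while loop with a mirrored flag and break is replaced by a closed-form mirror length m = min(x+1, n-1-x) and a single slice-vs-reversed-slice equality per candidate axis.
import Mathlib
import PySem

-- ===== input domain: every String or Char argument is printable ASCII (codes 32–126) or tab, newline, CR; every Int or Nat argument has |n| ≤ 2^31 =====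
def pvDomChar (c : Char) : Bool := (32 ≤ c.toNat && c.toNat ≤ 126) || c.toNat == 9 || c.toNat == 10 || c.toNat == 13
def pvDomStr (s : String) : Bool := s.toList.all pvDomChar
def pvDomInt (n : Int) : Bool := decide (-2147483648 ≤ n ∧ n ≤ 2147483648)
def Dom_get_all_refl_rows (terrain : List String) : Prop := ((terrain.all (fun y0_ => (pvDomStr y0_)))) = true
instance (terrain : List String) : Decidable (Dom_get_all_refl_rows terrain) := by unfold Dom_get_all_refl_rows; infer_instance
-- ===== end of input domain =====

-- B replaces A's inner two-pointer while loop (with a mirrored flag and a break) by a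
-- closed-form mirror length and one slice-vs-reversed-slice equality per axis: simpler, same cost.

-- ===== PORT A =====
-- inner 'while lower >= 0 and upper < len(terrain)' loop of A
def pvInnerA (terrain : List String) (lower upper : Int) (mirrored : Bool) : Bool :=
  if 0 ≤ lower ∧ upper < (terrain.length : Int) then
    if PySem.List.pyGet? terrain lower ≠ PySem.List.pyGet? terrain upper then false
    else pvInnerA terrain (lower - 1) (upper + 1) true
  else mirrored
termination_by ((terrain.length : Int) - upper).toNat
decreasing_by omega

-- outer 'while x < len(terrain)' loop of A
def pvOuterA (terrain : List String) (x : Int) (res : List Int) : List Int :=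
  if x < (terrain.length : Int) then
    pvOuterA terrain (x + 1) (if pvInnerA terrain x (x + 1) false then res ++ [x] else res)
  else res
termination_by ((terrain.length : Int) - x).toNat
decreasing_by omega

def get_all_refl_rows (terrain : List String) : List Int :=
  pvOuterA terrain 0 []

-- ===== PORT B =====
def get_all_refl_rows_alt (terrain : List String) : List Int :=
  let n : Int := terrain.length
  (PySem.List.pyRange 0 (n - 1) 1).foldl
    (fun res x =>
      let m : Int := min (x + 1) (n - 1 - x)
      if PySem.List.slice terrain (some (x + 1 - m)) (some (x + 1)) =
         (PySem.List.slice terrain (some (x + 1)) (some (x + 1 + m))).reverse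
      then res ++ [x] else res) []

-- ===== PRECONDITION & SPEC =====
def Spec_get_all_refl_rows (terrain : List String) (out : List Int) : Prop := out = get_all_refl_rows_alt terrain
instance (terrain : List String) (out : List Int) : Decidable (Spec_get_all_refl_rows terrain out) := by unfold Spec_get_all_refl_rows; infer_instance

-- ===== CLAIM (what is proved, stated in full; the proofs are below) =====
def Claim_equal_get_all_refl_rows : Prop := ∀ (terrain : List String), Dom_get_all_refl_rows terrain → Spec_get_all_refl_rows terrain (get_all_refl_rows terrain)

-- ===== LEMMAS AND PROOFS =====

-- A's inner loop returns the flag unchanged when its guard fails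
theorem pvInnerA_not_guard (terrain : List String) (lower upper : Int) (mirrored : Bool)
    (h : ¬ (0 ≤ lower ∧ upper < (terrain.length : Int))) :
    pvInnerA terrain lower upper mirrored = mirrored := by
  rw [pvInnerA, if_neg h]

-- characterisation of A's inner loop: all mirrored pairs in range are equal
theorem pvInnerA_eq (terrain : List String) (lower upper : Int) (mirrored : Bool) :
    (pvInnerA terrain lower upper mirrored = true) ↔
      (if 0 ≤ lower ∧ upper < (terrain.length : Int) then
        (∀ j : Int, 0 ≤ j → j ≤ lower → upper + j < (terrain.length : Int) →
          PySem.List.pyGet? terrain (lower - j) = PySem.List.pyGet? terrain (upper + j))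
      else mirrored = true) := by
  induction lower, upper, mirrored using pvInnerA.induct terrain with
  | case1 lower upper mirrored hg hne =>
    rw [pvInnerA, if_pos hg, if_pos hne, if_pos hg]
    constructor
    · intro hcontra; exact absurd hcontra (by simp)
    · intro hall; exfalso
      exact hne (by simpa using hall 0 le_rfl hg.1 (by omega))
  | case2 lower upper mirrored hg hne ih =>
    rw [pvInnerA, if_pos hg, if_neg hne, if_pos hg, ih]
    have heq : PySem.List.pyGet? terrain lower = PySem.List.pyGet? terrain upper := by
      by_contra hc; exact hne hc
    by_cases hg' : 0 ≤ lower - 1 ∧ upper + 1 < (terrain.length : Int)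
    · rw [if_pos hg']
      constructor
      · intro hA j h0 hl hu
        by_cases hj : j = 0
        · subst hj; simpa using heq
        · have h2 := hA (j - 1) (by omega) (by omega) (by omega)
          rw [show lower - 1 - (j - 1) = lower - j by ring,
              show upper + 1 + (j - 1) = upper + j by ring] at h2
          exact h2
      · intro hA j h0 hl hu
        have h2 := hA (j + 1) (by omega) (by omega) (by omega)
        rw [show lower - (j + 1) = lower - 1 - j by ring,
            show upper + (j + 1) = upper + 1 + j by ring] at h2
        exact h2
    · rw [if_neg hg']
      simp only [true_iff]
      intro j h0 hl hu
      by_cases hj : j = 0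
      · subst hj; simpa using heq
      · exact absurd (⟨by omega, by omega⟩ : 0 ≤ lower - 1 ∧ upper + 1 < (terrain.length : Int)) hg'
  | case3 lower upper mirrored hg =>
    rw [pvInnerA, if_neg hg, if_neg hg]

-- A's outer loop is a filter over the index range
theorem pvOuterA_eq_filter (terrain : List String) (x : Int) (res : List Int) :
    pvOuterA terrain x res =
      res ++ (PySem.List.pyRange x (terrain.length : Int) 1).filter
        (fun y => pvInnerA terrain y (y + 1) false) := by
  induction x, res using pvOuterA.induct terrain with
  | case1 x res h ih =>
    simp only [dite_eq_ite] at ih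
    rw [pvOuterA, if_pos h, ih, PySem.List.pyRange_one_cons h, List.filter_cons]
    by_cases hp : pvInnerA terrain x (x + 1) false = true
    · simp [hp]
    · simp [hp]
  | case2 x res h =>
    rw [pvOuterA, if_neg h, PySem.List.pyRange_one_eq_nil (by omega)]
    simp

-- mirror around the gap before position b, as a drop/take slice equality
theorem mirror_slice_iff {α : Type} (l : List α) (b m : Nat) (hm : m ≤ b) (hbm : b + m ≤ l.length) :
    ((l.drop (b - m)).take m = ((l.drop b).take m).reverse) ↔
      (∀ j, j < m → l[b - 1 - j]? = l[b + j]?) := by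
  have hlen : ((l.drop b).take m).length = m := by
    simp [List.length_take, List.length_drop]; omega
  constructor
  · intro hEq j hj
    have h2 := congrArg (fun t => t[m - 1 - j]?) hEq
    simp only at h2
    rw [List.getElem?_take, if_pos (by omega), List.getElem?_drop,
        List.getElem?_reverse (by omega), hlen,
        List.getElem?_take, if_pos (by omega), List.getElem?_drop] at h2
    rw [show b - m + (m - 1 - j) = b - 1 - j by omega,
        show b + (m - 1 - (m - 1 - j)) = b + j by omega] at h2
    exact h2
  · intro hAll
    apply List.ext_getElem?
    intro k
    by_cases hk : k < m
    · rw [List.getElem?_take, if_pos hk, List.getElem?_drop,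
          List.getElem?_reverse (by omega), hlen,
          List.getElem?_take, if_pos (by omega), List.getElem?_drop]
      have h2 := hAll (m - 1 - k) (by omega)
      rw [show b - 1 - (m - 1 - k) = b - m + k by omega] at h2
      exact h2
    · rw [List.getElem?_take, if_neg hk, List.getElem?_eq_none_iff.mpr (by simp [hlen]; omega)]

-- on indices B actually visits, A's inner-loop test equals B's slice test
theorem pA_eq_pB (terrain : List String) (x : Int) (h0 : 0 ≤ x) (h1 : x < (terrain.length : Int) - 1) :
    pvInnerA terrain x (x + 1) false =
      decide (PySem.List.slice terrain (some (x + 1 - min (x + 1) ((terrain.length : Int) - 1 - x))) (some (x + 1)) =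
        (PySem.List.slice terrain (some (x + 1)) (some (x + 1 + min (x + 1) ((terrain.length : Int) - 1 - x)))).reverse) := by
  have hma : min (x + 1) ((terrain.length : Int) - 1 - x) ≤ x + 1 := min_le_left _ _
  have hmb : min (x + 1) ((terrain.length : Int) - 1 - x) ≤ (terrain.length : Int) - 1 - x := min_le_right _ _
  have hm1 : 1 ≤ min (x + 1) ((terrain.length : Int) - 1 - x) := le_min (by omega) (by omega)
  set m : Int := min (x + 1) ((terrain.length : Int) - 1 - x) with hmdef
  rw [Bool.eq_iff_iff, decide_eq_true_iff, pvInnerA_eq, if_pos ⟨h0, by omega⟩]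
  rw [PySem.List.slice_toNat terrain (by omega) (by omega),
      PySem.List.slice_toNat terrain (by omega) (by omega)]
  rw [show (x + 1 - m).toNat = (x + 1).toNat - m.toNat by omega,
      show (x + 1).toNat - ((x + 1).toNat - m.toNat) = m.toNat by omega,
      show (x + 1 + m).toNat - (x + 1).toNat = m.toNat by omega]
  rw [mirror_slice_iff terrain (x + 1).toNat m.toNat (by omega) (by omega)]
  constructor
  · intro hA j hj
    have h2 := hA (j : Int) (by omega) (by omega) (by omega)
    rw [PySem.List.pyGet?_of_nonneg _ (by omega), PySem.List.pyGet?_of_nonneg _ (by omega)] at h2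
    rw [show (x - (j : Int)).toNat = (x + 1).toNat - 1 - j by omega,
        show (x + 1 + (j : Int)).toNat = (x + 1).toNat + j by omega] at h2
    exact h2
  · intro hB j hj0 hjx hjn
    have h2 := hB j.toNat (by omega)
    rw [PySem.List.pyGet?_of_nonneg _ (by omega), PySem.List.pyGet?_of_nonneg _ (by omega)]
    rw [show (x - j).toNat = (x + 1).toNat - 1 - j.toNat by omega,
        show (x + 1 + j).toNat = (x + 1).toNat + j.toNat by omega]
    exact h2

theorem get_all_refl_rows_eq_alt (terrain : List String) :
    get_all_refl_rows terrain = get_all_refl_rows_alt terrain := by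
  rw [get_all_refl_rows, pvOuterA_eq_filter]
  rw [show get_all_refl_rows_alt terrain =
      (PySem.List.pyRange 0 ((terrain.length : Int) - 1) 1).foldl
        (fun res x =>
          if PySem.List.slice terrain (some (x + 1 - min (x + 1) ((terrain.length : Int) - 1 - x))) (some (x + 1)) =
             (PySem.List.slice terrain (some (x + 1)) (some (x + 1 + min (x + 1) ((terrain.length : Int) - 1 - x)))).reverse
          then res ++ [x] else res) [] from rfl]
  rw [PySem.List.foldl_append_ite_eq_filter]
  simp only [List.nil_append]
  by_cases hn : (terrain.length : Int) ≤ 0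
  · rw [PySem.List.pyRange_one_eq_nil (by omega), PySem.List.pyRange_one_eq_nil (by omega)]
    simp
  · rw [PySem.List.pyRange_one_append 0 ((terrain.length : Int) - 1) (terrain.length : Int) (by omega) (by omega),
        List.filter_append]
    have hsing : PySem.List.pyRange ((terrain.length : Int) - 1) (terrain.length : Int) 1 =
        [(terrain.length : Int) - 1] := by
      have h3 := PySem.List.pyRange_one_singleton ((terrain.length : Int) - 1)
      rw [show ((terrain.length : Int) - 1) + 1 = (terrain.length : Int) by ring] at h3
      exact h3
    rw [hsing, List.filter_cons]
    rw [show ((terrain.length : Int) - 1) + 1 = (terrain.length : Int) by ring]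
    rw [pvInnerA_not_guard terrain _ _ _ (by omega)]
    simp only [Bool.false_eq_true, if_false, List.filter_nil, List.append_nil]
    exact List.filter_congr (fun x hx => by
      have hmem := (PySem.List.mem_pyRange_one).mp hx
      exact pA_eq_pB terrain x hmem.1 (by omega))

-- ===== VERDICT (by name: the statement is the Claim_ definition above) =====
theorem get_all_refl_rows_spec : Claim_equal_get_all_refl_rows := by
  intro terrain _
  exact get_all_refl_rows_eq_alt terrain
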